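-- pv_equiv track=rewrite | github.com/andrejvysny/media-analysis | safe_move.py | fmt_actions
-- ===== SOURCE A (Python) =====
-- LABEL_PAD       = "       "        # column alignment
--
-- def fmt_actions(state: str, spinner: str) -> str:
--     parts: list[str] = []
--     for phase in ("Copying", "Hashing", "Renaming"):
--         if state == phase.lower():
--             parts.append(f"{phase} {spinner}")
--         elif (phase == "Copying" and state in ("hashing", "renaming", "done")) or \
--              (phase == "Hashing" and state in ("renaming", "done")) or \
--              (phase == "Renaming" and state == "done"):
--             parts.append(f"{phase} DONE")
--         else:
--             parts.append(phase)
--     return "Actions:" + LABEL_PAD + "  –  ".join(parts)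
-- ===== SOURCE B (Python) =====
-- LABEL_PAD       = "       "        # column alignment
--
-- def fmt_actions(state: str, spinner: str) -> str:
--     # No loop, no join: each state selects the fully pre-rendered action line,
--     # with the spinner spliced into the phase that is currently running.
--     if state == "copying":
--         body = "Copying " + spinner + "  \u2013  Hashing  \u2013  Renaming"
--     elif state == "hashing":
--         body = "Copying DONE  \u2013  Hashing " + spinner + "  \u2013  Renaming"
--     elif state == "renaming":
--         body = "Copying DONE  \u2013  Hashing DONE  \u2013  Renaming " + spinner
--     elif state == "done":
--         body = "Copying DONE  \u2013  Hashing DONE  \u2013  Renaming DONE"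
--     else:
--         body = "Copying  \u2013  Hashing  \u2013  Renaming"
--     return "Actions:" + LABEL_PAD + body
-- ===== Notes on version B (the rewrite author's own statement) =====
-- stated objective: simpler
-- what changed: Drops A's phase loop, per-phase three-way membership branching and join: B directly selects one of five fully pre-rendered action lines by the state, splicing the spinner into the running phase.
import Mathlib
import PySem

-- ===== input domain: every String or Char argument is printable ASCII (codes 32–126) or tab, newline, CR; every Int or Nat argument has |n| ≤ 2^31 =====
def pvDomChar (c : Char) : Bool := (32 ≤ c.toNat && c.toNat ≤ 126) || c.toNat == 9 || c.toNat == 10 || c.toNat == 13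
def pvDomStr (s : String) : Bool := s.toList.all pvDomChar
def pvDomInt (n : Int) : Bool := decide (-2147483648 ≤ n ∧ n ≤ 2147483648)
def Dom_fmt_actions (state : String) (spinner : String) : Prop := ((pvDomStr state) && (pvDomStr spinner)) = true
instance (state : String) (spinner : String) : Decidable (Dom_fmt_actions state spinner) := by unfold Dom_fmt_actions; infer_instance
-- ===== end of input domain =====

-- B replaces A's per-phase loop, membership branches and join by direct selection of a pre-rendered whole line per state; objective: simpler.


-- ===== PORT A =====
def LABEL_PAD : String := "       "

def fmt_actions (state : String) (spinner : String) : String :=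
  let parts : List String :=
    (["Copying", "Hashing", "Renaming"] : List String).foldl (fun parts phase =>
      if state == PySem.Str.lower phase then
        parts ++ [phase ++ " " ++ spinner]
      else if (phase == "Copying" && (state == "hashing" || state == "renaming" || state == "done")) ||
              (phase == "Hashing" && (state == "renaming" || state == "done")) ||
              (phase == "Renaming" && state == "done") then
        parts ++ [phase ++ " DONE"]
      else
        parts ++ [phase]) []
  "Actions:" ++ LABEL_PAD ++ PySem.Str.join "  –  " parts

-- ===== PORT B =====
def fmt_actions_alt (state : String) (spinner : String) : String :=
  let body : String :=
    if state == "copying" then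
      "Copying " ++ spinner ++ "  –  Hashing  –  Renaming"
    else if state == "hashing" then
      "Copying DONE  –  Hashing " ++ spinner ++ "  –  Renaming"
    else if state == "renaming" then
      "Copying DONE  –  Hashing DONE  –  Renaming " ++ spinner
    else if state == "done" then
      "Copying DONE  –  Hashing DONE  –  Renaming DONE"
    else
      "Copying  –  Hashing  –  Renaming"
  "Actions:" ++ LABEL_PAD ++ body

-- ===== PRECONDITION & SPEC =====
def Spec_fmt_actions (state : String) (spinner : String) (out : String) : Prop := out = fmt_actions_alt state spinner
instance (state : String) (spinner : String) (out : String) : Decidable (Spec_fmt_actions state spinner out) := by unfold Spec_fmt_actions; infer_instance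

-- ===== CLAIM (what is proved, stated in full; the proofs are below) =====
def Claim_equal_fmt_actions : Prop := ∀ (state : String) (spinner : String), Dom_fmt_actions state spinner → Spec_fmt_actions state spinner (fmt_actions state spinner)

-- ===== LEMMAS AND PROOFS =====

-- ===== VERDICT (by name: the statement is the Claim_ definition above) =====
theorem fmt_actions_spec : Claim_equal_fmt_actions := by
  intro state spinner _
  unfold Spec_fmt_actions fmt_actions fmt_actions_alt
  have lC : PySem.Str.lower "Copying" = "copying" := by decide
  have lH : PySem.Str.lower "Hashing" = "hashing" := by decide
  have lR : PySem.Str.lower "Renaming" = "renaming" := by decide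
  apply String.toList_injective
  by_cases h1 : state = "copying"
  · subst h1
    simp [List.foldl, lC, lH, lR, PySem.Str.join, PySem.Chars.join,
          List.intercalate, List.intersperse, List.flatten]
  by_cases h2 : state = "hashing"
  · subst h2
    simp [List.foldl, lC, lH, lR, PySem.Str.join, PySem.Chars.join,
          List.intercalate, List.intersperse, List.flatten]
  by_cases h3 : state = "renaming"
  · subst h3
    simp [List.foldl, lC, lH, lR, PySem.Str.join, PySem.Chars.join,
          List.intercalate, List.intersperse, List.flatten]
  by_cases h4 : state = "done"
  · subst h4
    simp [List.foldl, lC, lH, lR, PySem.Str.join, PySem.Chars.join,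
          List.intercalate, List.intersperse, List.flatten]
  · simp [List.foldl, lC, lH, lR, h1, h2, h3, h4, PySem.Str.join, PySem.Chars.join,
          List.intercalate, List.intersperse, List.flatten]
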